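-- pv_equiv track=rewrite | github.com/bwang1008/AdventOfCode2023 | day12B.py | group_up_completed
-- ===== SOURCE A (Python) =====
-- from typing import List, Optional
--
-- DAMAGED_SPRING: str = "#"
--
-- def group_up_completed(row: List[str]) -> List[int]:
--     """Given row of springs, count up the groups of damaged springs."""
--     groups: List[int] = []
--
--     curr_num = 0
--
--     for c in row:
--         if c == DAMAGED_SPRING:
--             curr_num += 1
--         else:
--             if curr_num > 0:
--                 groups.append(curr_num)
--             curr_num = 0
--
--     if curr_num > 0:
--         groups.append(curr_num)
--
--     return groups
-- ===== SOURCE B (Python) =====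
-- from typing import List
--
-- DAMAGED_SPRING: str = "#"
--
-- def group_up_completed(row: List[str]) -> List[int]:
--     """Given row of springs, count up the groups of damaged springs."""
--     n = len(row)
--     damaged = [c == DAMAGED_SPRING for c in row] + [False]
--     prev = [False] + damaged[:-1]
--     starts = [i for i in range(n) if damaged[i] and not prev[i]]
--     ends = [i for i in range(n) if damaged[i] and not damaged[i + 1]]
--     return [e - s + 1 for s, e in zip(starts, ends)]
-- ===== Notes on version B (the rewrite author's own statement) =====
-- stated objective: alternative
-- what changed: Instead of A's single-pass counter/flush state machine, B marks damaged positions in a padded boolean array, collects run-start indices (damaged with non-damaged predecessor) and run-end indices (damaged with non-damaged successor) in two staged index scans, and zips them into lengths end-start+1.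
import Mathlib
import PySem

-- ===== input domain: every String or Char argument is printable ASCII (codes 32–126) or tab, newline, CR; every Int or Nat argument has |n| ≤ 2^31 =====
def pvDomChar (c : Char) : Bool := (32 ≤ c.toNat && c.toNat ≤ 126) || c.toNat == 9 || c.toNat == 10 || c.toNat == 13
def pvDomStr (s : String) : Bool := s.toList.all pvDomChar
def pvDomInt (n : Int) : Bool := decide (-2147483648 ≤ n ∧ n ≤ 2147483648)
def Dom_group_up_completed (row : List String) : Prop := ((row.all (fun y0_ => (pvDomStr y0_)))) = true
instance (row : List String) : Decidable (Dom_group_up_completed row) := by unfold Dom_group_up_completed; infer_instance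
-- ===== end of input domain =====

-- B replaces A's counter/flush state machine by boundary detection: mark damaged positions in a
-- padded boolean array, collect run-start and run-end indices in two staged scans, zip to lengths.

-- ===== PORT A =====
-- A: fold over the row keeping (groups, curr_num); flush curr_num on a non-'#' and at the end.
def group_up_completed (row : List String) : List Int :=
  let st := row.foldl
    (fun (s : List Int × Int) c =>
      if c = "#" then (s.1, s.2 + 1)
      else if s.2 > 0 then (s.1 ++ [s.2], 0) else (s.1, 0))
    ([], 0)
  if st.2 > 0 then st.1 ++ [st.2] else st.1

-- ===== PORT B =====
-- B: damaged = [c == '#' for c in row] + [False]; prev = [False] + damaged[:-1];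
-- starts/ends = index scans; lengths by zipping. All indexing is in range, so getD is exact;
-- damaged is nonempty, so dropLast is exactly Python's damaged[:-1].
def group_up_completed_alt (row : List String) : List Int :=
  let n := row.length
  let damaged := row.map (fun c => decide (c = "#")) ++ [false]
  let prev := false :: damaged.dropLast
  let starts := (List.range n).filter (fun i => damaged.getD i false && !(prev.getD i false))
  let ends := (List.range n).filter (fun i => damaged.getD i false && !(damaged.getD (i + 1) false))
  (starts.zip ends).map (fun p => ((p.2 : Int) - (p.1 : Int) + 1))

-- ===== PRECONDITION & SPEC =====
def Spec_group_up_completed (row : List String) (out : List Int) : Prop := out = group_up_completed_alt row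
instance (row : List String) (out : List Int) : Decidable (Spec_group_up_completed row out) := by unfold Spec_group_up_completed; infer_instance

-- ===== CLAIM (what is proved, stated in full; the proofs are below) =====
def Claim_equal_group_up_completed : Prop := ∀ (row : List String), Dom_group_up_completed row → Spec_group_up_completed row (group_up_completed row)

-- ===== LEMMAS AND PROOFS =====

-- Both ports depend on the row only through which elements equal "#"; we compare them
-- through a common boolean-level recursion pvGB (lengths of maximal true-runs).

def pvGB : List Bool → List Int
  | [] => []
  | true :: d => (1 + ((d.takeWhile (fun b => b)).length : Int)) :: pvGB (d.dropWhile (fun b => b))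
  | false :: d => pvGB d
termination_by l => l.length
decreasing_by
  · simp only [List.length_cons]
    exact Nat.lt_succ_of_le (List.length_dropWhile_le _ d)
  · simp

-- ---- A side ----

def pvStepB (s : List Int × Int) (b : Bool) : List Int × Int :=
  if b then (s.1, s.2 + 1)
  else if s.2 > 0 then (s.1 ++ [s.2], 0) else (s.1, 0)

def pvFinishA (s : List Int × Int) : List Int := if s.2 > 0 then s.1 ++ [s.2] else s.1

theorem pvFoldAB (row : List String) : ∀ (s : List Int × Int),
    row.foldl
      (fun (s : List Int × Int) c =>
        if c = "#" then (s.1, s.2 + 1)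
        else if s.2 > 0 then (s.1 ++ [s.2], 0) else (s.1, 0)) s
      = (row.map (fun c => decide (c = "#"))).foldl pvStepB s := by
  induction row with
  | nil => intro s; rfl
  | cons c rest ih =>
    intro s
    simp only [List.foldl_cons, List.map_cons]
    rw [ih]
    congr 1
    by_cases h : c = "#" <;> simp [pvStepB, h]

theorem pvA_eq (row : List String) :
    group_up_completed row = pvFinishA ((row.map (fun c => decide (c = "#"))).foldl pvStepB ([], 0)) := by
  unfold group_up_completed
  rw [pvFoldAB]
  rfl

-- the accumulated groups factor out as a prefix
theorem pvPrefix (d : List Bool) : ∀ (groups : List Int) (curr : Int),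
    pvFinishA (d.foldl pvStepB (groups, curr)) =
      groups ++ pvFinishA (d.foldl pvStepB ([], curr)) := by
  induction d with
  | nil =>
    intro groups curr
    simp only [List.foldl_nil, pvFinishA]
    split_ifs <;> simp
  | cons b rest ih =>
    intro groups curr
    simp only [List.foldl_cons, pvStepB]
    split_ifs with h1 h2
    · exact ih groups (curr + 1)
    · rw [ih (groups ++ [curr]) 0, List.nil_append, ih [curr] 0, List.append_assoc]
    · rw [ih groups 0]

-- a run of trues just increments the counter
theorem pvTrueRun : ∀ (run : List Bool), (∀ x ∈ run, x = true) →
    ∀ (groups : List Int) (curr : Int),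
      run.foldl pvStepB (groups, curr) = (groups, curr + run.length) := by
  intro run
  induction run with
  | nil => intro _ groups curr; simp
  | cons b rest ih =>
    intro h groups curr
    have hb : b = true := h b (by simp)
    subst hb
    rw [List.foldl_cons, show pvStepB (groups, curr) true = (groups, curr + 1) from by simp [pvStepB],
        ih (fun x hx => h x (by simp [hx])) groups (curr + 1)]
    simp only [List.length_cons]
    refine Prod.ext rfl ?_
    push_cast
    ring

theorem pvStep_false_zero (g : List Int) : pvStepB (g, 0) false = (g, 0) := by
  simp [pvStepB]

theorem pvStep_false_flush (s : List Int × Int) (h : s.2 > 0) :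
    pvStepB s false = (s.1 ++ [s.2], 0) := by
  simp [pvStepB, h]

-- bool-level A on a list starting with a maximal true-run
theorem pvA_cons_true (t u : List Bool) (ht : ∀ x ∈ t, x = true)
    (hu : u.getD 0 false = false) :
    pvFinishA ((true :: (t ++ u)).foldl pvStepB ([], 0)) =
      (1 + (t.length : Int)) :: pvFinishA (u.foldl pvStepB ([], 0)) := by
  rw [List.foldl_cons, show pvStepB (([] : List Int), (0:Int)) true = ([], 1) from by simp [pvStepB],
      List.foldl_append, pvTrueRun t ht [] 1]
  match u with
  | [] =>
    simp only [List.foldl_nil, pvFinishA]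
    have hpos : (0:Int) < 1 + (t.length : Int) := by positivity
    rw [if_pos hpos]
    simp
  | b :: tl =>
    have hb : b = false := by simpa using hu
    subst hb
    have hpos : ((([] : List Int), (1:Int) + (t.length : Int))).2 > 0 := by positivity
    rw [List.foldl_cons, pvStep_false_flush _ hpos, List.nil_append,
        pvPrefix tl [1 + (t.length : Int)] 0]
    rw [List.foldl_cons, pvStep_false_zero]
    simp

theorem pvA_gb (d : List Bool) : pvFinishA (d.foldl pvStepB ([], 0)) = pvGB d := by
  induction d using pvGB.induct with
  | case1 => rw [pvGB]; rfl
  | case2 rest ih =>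
    rw [pvGB]
    have hsplit : rest = rest.takeWhile (fun b => b) ++ rest.dropWhile (fun b => b) :=
      (List.takeWhile_append_dropWhile).symm
    have hrun : ∀ x ∈ rest.takeWhile (fun b => b), x = true := by
      intro x hx; simpa using List.mem_takeWhile_imp hx
    have hu : (rest.dropWhile (fun b => b)).getD 0 false = false := by
      have := List.head?_dropWhile_not (fun b => b) rest
      cases hh : (rest.dropWhile (fun b => b)) with
      | nil => rfl
      | cons y ys =>
        rw [hh] at this
        simp only [List.head?_cons] at this
        simp only [List.getD_cons_zero]
        simpa using this
    conv_lhs => rw [hsplit]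
    rw [pvA_cons_true _ _ hrun hu, ih]
  | case3 rest ih =>
    rw [pvGB, List.foldl_cons, pvStep_false_zero, ih]
-- ---- B side ----

-- start indices with an explicit "previous element" parameter, and end indices
def pvSB (p : Bool) (d : List Bool) : List Nat :=
  (List.range d.length).filter (fun i => d.getD i false && !((p :: d).getD i false))
def pvEB (d : List Bool) : List Nat :=
  (List.range d.length).filter (fun i => d.getD i false && !(d.getD (i + 1) false))
def pvRes (d : List Bool) : List Int :=
  ((pvSB false d).zip (pvEB d)).map (fun p => ((p.2 : Int) - (p.1 : Int) + 1))

theorem pvRange_cons (n : Nat) : List.range (n + 1) = 0 :: (List.range n).map (· + 1) := by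
  rw [List.range_succ_eq_map]

theorem pvSB_cons (p b : Bool) (d : List Bool) :
    pvSB p (b :: d) = (if b && !p then [0] else []) ++ (pvSB b d).map (· + 1) := by
  unfold pvSB
  rw [List.length_cons, pvRange_cons, List.filter_cons, List.filter_map]
  have hcomp : ((fun i => (b :: d).getD i false && !((p :: b :: d).getD i false)) ∘ (fun x => x + 1))
      = (fun i => d.getD i false && !((b :: d).getD i false)) := by
    funext i; simp
  rw [hcomp]
  by_cases h : (b && !p) = true <;> simp [h]
theorem pvEB_cons (b : Bool) (d : List Bool) :
    pvEB (b :: d) = (if b && !(d.getD 0 false) then [0] else []) ++ (pvEB d).map (· + 1) := by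
  unfold pvEB
  rw [List.length_cons, pvRange_cons, List.filter_cons, List.filter_map]
  have hcomp : ((fun i => (b :: d).getD i false && !((b :: d).getD (i + 1) false)) ∘ (fun x => x + 1))
      = (fun i => d.getD i false && !(d.getD (i + 1) false)) := by
    funext i; simp
  rw [hcomp]
  simp only [Nat.zero_add, List.getD_cons_zero, List.getD_cons_succ]
  split_ifs <;> simp
theorem pvSB_prev_irrel (d : List Bool) (h : d.getD 0 false = false) :
    pvSB true d = pvSB false d := by
  unfold pvSB
  apply List.filter_congr
  intro i _
  cases i with
  | zero =>
    simp only [List.getD_eq_getElem?_getD] at h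
    simp [h]
  | succ j => simp
theorem pvSB_run : ∀ (t : List Bool) (u : List Bool), (∀ x ∈ t, x = true) →
    u.getD 0 false = false →
    pvSB true (t ++ u) = (pvSB false u).map (· + t.length) := by
  intro t
  induction t with
  | nil =>
    intro u _ hu
    rw [List.nil_append, pvSB_prev_irrel u hu]
    simp
  | cons b t' ih =>
    intro u h hu
    have hb : b = true := h b (by simp)
    subst hb
    rw [List.cons_append, pvSB_cons, ih u (fun x hx => h x (by simp [hx])) hu]
    simp only [Bool.not_true, Bool.and_false, List.nil_append, List.map_map,
      List.length_cons, if_neg (by simp : ¬ (false = true))]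
    apply List.map_congr_left
    intro x _
    simp only [Function.comp_apply]
    omega
theorem pvEB_run : ∀ (t : List Bool) (u : List Bool), (∀ x ∈ t, x = true) →
    u.getD 0 false = false →
    pvEB (true :: (t ++ u)) = t.length :: (pvEB u).map (· + (t.length + 1)) := by
  intro t
  induction t with
  | nil =>
    intro u _ hu
    simp only [List.getD_eq_getElem?_getD] at hu
    rw [List.nil_append, pvEB_cons, if_pos (by simp [List.getD_eq_getElem?_getD, hu])]
    simp
  | cons b t' ih =>
    intro u h hu
    have hb : b = true := h b (by simp)
    subst hb
    rw [List.cons_append, pvEB_cons, ih u (fun x hx => h x (by simp [hx])) hu]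
    rw [if_neg (by simp)]
    simp only [List.nil_append, List.map_cons, List.map_map, List.length_cons]
    exact congrArg (List.cons (t'.length + 1))
      (List.map_congr_left (fun x _ => by simp only [Function.comp_apply]; omega))
theorem pvShift (S E : List Nat) (k : Nat) :
    (((S.map (· + k)).zip (E.map (· + k))).map (fun p => ((p.2 : Int) - (p.1 : Int) + 1)))
      = (S.zip E).map (fun p => ((p.2 : Int) - (p.1 : Int) + 1)) := by
  rw [List.zip_map, List.map_map]
  congr 1
  funext p
  simp only [Function.comp_apply, Prod.map]
  push_cast
  ring

theorem pvRes_gb (d : List Bool) : pvRes d = pvGB d := by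
  induction d using pvGB.induct with
  | case1 => rw [pvGB]; rfl
  | case2 rest ih =>
    rw [pvGB]
    have hsplit : rest = rest.takeWhile (fun b => b) ++ rest.dropWhile (fun b => b) :=
      (List.takeWhile_append_dropWhile).symm
    have hrun : ∀ x ∈ rest.takeWhile (fun b => b), x = true := by
      intro x hx; simpa using List.mem_takeWhile_imp hx
    have hu : (rest.dropWhile (fun b => b)).getD 0 false = false := by
      have := List.head?_dropWhile_not (fun b => b) rest
      cases hh : (rest.dropWhile (fun b => b)) with
      | nil => rfl
      | cons y ys =>
        rw [hh] at this
        simp only [List.head?_cons] at this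
        simp only [List.getD_cons_zero]
        simpa using this
    set t := rest.takeWhile (fun b => b) with htdef
    set u := rest.dropWhile (fun b => b) with hudef
    unfold pvRes
    conv_lhs => rw [hsplit]
    rw [pvSB_cons, if_pos (by simp), pvSB_run t u hrun hu, pvEB_run t u hrun hu,
      List.map_map]
    have hmm : ((pvSB false u).map ((· + 1) ∘ (· + t.length)))
        = (pvSB false u).map (· + (t.length + 1)) := by
      apply List.map_congr_left
      intro x _
      simp only [Function.comp_apply]
      omega
    rw [hmm, List.singleton_append, List.zip_cons_cons, List.map_cons, pvShift]
    unfold pvRes at ih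
    rw [ih]
    congr 1
    push_cast
    ring
  | case3 rest ih =>
    rw [pvGB, ← ih]
    unfold pvRes
    rw [pvSB_cons, pvEB_cons, if_neg (by simp), if_neg (by simp), List.nil_append,
      List.nil_append, pvShift]
theorem pvPad (d : List Bool) : ∀ (i : Nat), (d ++ [false]).getD i false = d.getD i false := by
  induction d with
  | nil => intro i; cases i <;> simp
  | cons b rest ih =>
    intro i
    cases i with
    | zero => simp
    | succ j => simpa using ih j

theorem pvB_eq (row : List String) :
    group_up_completed_alt row = pvRes (row.map (fun c => decide (c = "#"))) := by
  simp only [group_up_completed_alt, pvRes, pvSB, pvEB, List.dropLast_concat,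
    List.length_map, pvPad]
-- ===== VERDICT (by name: the statement is the Claim_ definition above) =====
theorem group_up_completed_spec : Claim_equal_group_up_completed := by
  intro row _
  unfold Spec_group_up_completed
  rw [pvA_eq, pvA_gb, pvB_eq, pvRes_gb]
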